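-- pv_equiv track=rewrite | github.com/s29602-pj/MetaheurstykaNonogram | Cel.py | ekstrakt_bloki
-- ===== SOURCE A (Python) =====
-- def ekstrakt_bloki(ciag):
--     bloki = []
--     licznik = 0
--     for x in ciag:
--         if x == 2:
--             licznik += 1
--         elif licznik > 0:
--             bloki.append(licznik)
--             licznik = 0
--     if licznik > 0:
--         bloki.append(licznik)
--     return bloki
-- ===== SOURCE B (Python) =====
-- from itertools import groupby
--
-- def ekstrakt_bloki(ciag):
--     return [sum(1 for _ in g) for k, g in groupby(ciag) if k == 2]
-- ===== Notes on version B (the rewrite author's own statement) =====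
-- stated objective: idiomatic
-- what changed: Replaced the manual counter-with-reset loop by itertools.groupby: group consecutive equal elements, then keep the lengths of the groups whose key is 2.
import Mathlib
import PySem

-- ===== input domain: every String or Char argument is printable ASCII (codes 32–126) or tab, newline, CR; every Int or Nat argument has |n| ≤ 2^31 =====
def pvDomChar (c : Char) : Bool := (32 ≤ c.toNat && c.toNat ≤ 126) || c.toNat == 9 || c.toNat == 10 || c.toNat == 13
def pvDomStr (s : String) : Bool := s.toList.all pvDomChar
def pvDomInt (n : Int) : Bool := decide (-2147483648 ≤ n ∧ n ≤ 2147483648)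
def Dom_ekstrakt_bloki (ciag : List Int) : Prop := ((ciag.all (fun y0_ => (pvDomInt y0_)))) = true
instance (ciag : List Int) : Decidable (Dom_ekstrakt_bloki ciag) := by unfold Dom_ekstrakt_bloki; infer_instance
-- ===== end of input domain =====

-- B replaces A's counter-with-reset loop by grouping consecutive equal elements and
-- keeping the lengths of the groups with key 2 (idiomatic; same cost).

-- ===== PORT A =====
-- the for-loop of A, threading (bloki, licznik) exactly as the Python does
def ekstraktLoopA : List Int → List Int → Int → List Int
  | [], bloki, licznik => if licznik > 0 then bloki ++ [licznik] else bloki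
  | x :: xs, bloki, licznik =>
      if x = 2 then ekstraktLoopA xs bloki (licznik + 1)
      else if licznik > 0 then ekstraktLoopA xs (bloki ++ [licznik]) 0
      else ekstraktLoopA xs bloki licznik

def ekstrakt_bloki (ciag : List Int) : List Int := ekstraktLoopA ciag [] 0

-- ===== PORT B =====
-- itertools.groupby: maximal runs of consecutive equal elements, as (key, run length) pairs
def pyGroupby : List Int → List (Int × Int)
  | [] => []
  | x :: xs =>
      (x, 1 + ((xs.takeWhile (· == x)).length : Int)) :: pyGroupby (xs.dropWhile (· == x))
termination_by l => l.length
decreasing_by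
  simp only [List.length_cons]
  exact Nat.lt_succ_of_le (List.length_dropWhile_le _ _)

-- the comprehension: lengths of the groups whose key is 2
def ekstrakt_bloki_alt (ciag : List Int) : List Int :=
  (pyGroupby ciag).filterMap (fun g => if g.1 == 2 then some g.2 else none)

-- ===== PRECONDITION & SPEC =====
def Spec_ekstrakt_bloki (ciag : List Int) (out : List Int) : Prop := out = ekstrakt_bloki_alt ciag
instance (ciag : List Int) (out : List Int) : Decidable (Spec_ekstrakt_bloki ciag out) := by unfold Spec_ekstrakt_bloki; infer_instance

-- ===== CLAIM (what is proved, stated in full; the proofs are below) =====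
def Claim_equal_ekstrakt_bloki : Prop := ∀ (ciag : List Int), Dom_ekstrakt_bloki ciag → Spec_ekstrakt_bloki ciag (ekstrakt_bloki ciag)

-- ===== LEMMAS AND PROOFS =====

-- accumulator lemma for A's loop
theorem ekstraktLoopA_append (xs : List Int) : ∀ (b : List Int) (n : Int),
    ekstraktLoopA xs b n = b ++ ekstraktLoopA xs [] n := by
  induction xs with
  | nil =>
      intro b n
      simp [ekstraktLoopA]
      split <;> simp
  | cons x rest ih =>
      intro b n
      simp only [ekstraktLoopA]
      split
      · exact ih b (n + 1)
      · split
        · rw [ih (b ++ [n]) 0, ih ([] ++ [n]) 0]; simp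
        · exact ih b n

-- dropping leading copies of a non-2 value does not change B's result
theorem alt_dropWhile_ne (y : Int) (hy : y ≠ 2) (ys : List Int) :
    ekstrakt_bloki_alt (ys.dropWhile (· == y)) = ekstrakt_bloki_alt ys := by
  cases ys with
  | nil => simp
  | cons z zs =>
      by_cases hz : z = y
      · subst hz
        simp only [List.dropWhile_cons, beq_self_eq_true, if_true]
        simp [ekstrakt_bloki_alt, pyGroupby, hy]
      · simp [hz]

-- main invariant: the loop from the empty accumulator computes B's result;
-- from a positive counter n it emits n plus the leading run of 2s, then continues
theorem ekstraktLoopA_main : ∀ (xs : List Int),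
    (ekstraktLoopA xs [] 0 = ekstrakt_bloki_alt xs) ∧
    (∀ n : Int, 0 < n →
      ekstraktLoopA xs [] n
        = (n + ((xs.takeWhile (· == 2)).length : Int))
            :: ekstrakt_bloki_alt (xs.dropWhile (· == 2))) := by
  intro xs
  induction xs with
  | nil =>
      constructor
      · simp [ekstraktLoopA, ekstrakt_bloki_alt, pyGroupby]
      · intro n hn
        simp [ekstraktLoopA, ekstrakt_bloki_alt, pyGroupby, hn]
  | cons x rest ih =>
      by_cases hx : x = 2
      · subst hx
        have loop2 : ∀ (n : Int), ekstraktLoopA (2 :: rest) [] n = ekstraktLoopA rest [] (n + 1) := by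
          intro n; simp [ekstraktLoopA]
        constructor
        · rw [loop2 0, show (0 : Int) + 1 = 1 from rfl, ih.2 1 (by norm_num)]
          simp [ekstrakt_bloki_alt, pyGroupby]
        · intro n hn
          rw [loop2 n, ih.2 (n + 1) (by omega)]
          simp
          ring
      · have hx2 : (x == 2) = false := by simp [hx]
        have altcons : ekstrakt_bloki_alt (x :: rest) = ekstrakt_bloki_alt rest := by
          rw [show ekstrakt_bloki_alt (x :: rest)
                = ekstrakt_bloki_alt (rest.dropWhile (· == x)) from by
                simp [ekstrakt_bloki_alt, pyGroupby, hx]]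
          exact alt_dropWhile_ne x hx rest
        constructor
        · rw [show ekstraktLoopA (x :: rest) [] 0 = ekstraktLoopA rest [] 0 from by
                simp [ekstraktLoopA, hx]]
          rw [ih.1, altcons]
        · intro n hn
          rw [show ekstraktLoopA (x :: rest) [] n = ekstraktLoopA rest [n] 0 from by
                simp [ekstraktLoopA, hx, hn]]
          rw [ekstraktLoopA_append rest [n] 0, ih.1]
          simp [hx2, altcons]

-- ===== VERDICT =====
theorem ekstrakt_bloki_spec : Claim_equal_ekstrakt_bloki := by
  intro ciag _
  unfold Spec_ekstrakt_bloki ekstrakt_bloki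
  exact (ekstraktLoopA_main ciag).1
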